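-- pv_equiv track=rewrite | github.com/alikzao/tao1 | tao1/libs/shop/shop.py | ware_filter
-- ===== SOURCE A (Python) =====
-- def ware_filter(filter):
-- 	# отфильтровует сами товары указаному списку атрибутов
-- 	if not isinstance(filter, list): filter = [filter]
-- 	categ = {}
-- 	for i in filter:
-- 		cat = i[:32]
-- 		attr = i[33:]
-- 		if not cat in categ: categ[cat] = []
-- 		categ[cat].append(attr)
-- 	cond = dict([('attr.'+i, {'$in': v}) for i, v in categ.items()])
-- 	#текущий вариант
-- 	# aaa = {'attr':{'diagonal':'17', 'korpus': 'metall'}}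
-- 	# cond = {'attr.diagonal: {$in: [15, 17]}}
-- 	# cond = {'docs: {$in: [15, 17]}}
-- 	#текущий для агрегации
-- 	#db.test.aggregate({$unwind: "$likes"})
-- 	# {'docs':[{'id':1, 'cat': 'diagonal', 'attr':'17'}, {id:2, 'cat':'korpus', 'attr': 'metall'}] }
-- 	return cond
-- ===== SOURCE B (Python) =====
-- def ware_filter(filter):
--     # B: two-phase decomposition — build (cat, attr) pairs once, take the
--     # first-appearance-ordered distinct categories, then collect each
--     # category's attrs by a comprehension scan (order preserved).
--     if not isinstance(filter, list):
--         filter = [filter]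
--     pairs = [(i[:32], i[33:]) for i in filter]
--     cats = list(dict.fromkeys(c for c, _ in pairs))
--     return {'attr.' + c: {'$in': [a for cc, a in pairs if cc == c]} for c in cats}
-- ===== Notes on version B (the rewrite author's own statement) =====
-- stated objective: alternative
-- what changed: A builds the groups in one pass by appending each attr into a mutated dict entry; B instead slices all (cat, attr) pairs once, takes the first-appearance-ordered distinct categories, and collects each category's attrs with a separate comprehension scan.
import Mathlib
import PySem

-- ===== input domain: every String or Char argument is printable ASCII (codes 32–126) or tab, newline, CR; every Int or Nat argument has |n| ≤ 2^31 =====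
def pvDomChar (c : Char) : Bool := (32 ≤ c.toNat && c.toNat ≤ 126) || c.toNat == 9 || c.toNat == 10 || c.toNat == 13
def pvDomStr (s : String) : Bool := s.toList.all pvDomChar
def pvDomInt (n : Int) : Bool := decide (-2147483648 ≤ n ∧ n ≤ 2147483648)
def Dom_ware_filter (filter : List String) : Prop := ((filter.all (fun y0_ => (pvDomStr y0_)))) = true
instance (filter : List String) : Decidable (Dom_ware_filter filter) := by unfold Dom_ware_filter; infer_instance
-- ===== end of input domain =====

-- B replaces A's single-pass dict accumulation by a two-phase decomposition
-- (slice pairs once, dedup the categories, per-category collection scan); objective: alternative.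

-- ===== PORT A =====
-- A: one pass over filter, appending each attr to a dict entry keyed by cat,
-- then rendering the dict's items.
def ware_filter (filter : List String) : List (String × List (String × List String)) :=
  let categ : PySem.Dict String (List String) :=
    filter.foldl (fun categ i =>
      let cat := PySem.Str.slice i none (some 32)
      let attr := PySem.Str.slice i (some 33) none
      let categ := if categ.contains cat then categ else categ.insert cat []
      categ.modify cat [] (fun v => v ++ [attr])) ⟨[]⟩
  categ.items.map (fun iv => ("attr." ++ iv.1, [("$in", iv.2)]))

-- ===== PORT B =====
def ware_filter_alt (filter : List String) : List (String × List (String × List String)) :=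
  let pairs := filter.map (fun i =>
    (PySem.Str.slice i none (some 32), PySem.Str.slice i (some 33) none))
  let cats := PySem.List.dedup (pairs.map Prod.fst)
  cats.map (fun c =>
    ("attr." ++ c, [("$in", (pairs.filter (fun p => p.1 == c)).map Prod.snd)]))

-- ===== PRECONDITION & SPEC =====
def Spec_ware_filter (filter : List String) (out : List (String × List (String × List String))) : Prop := out = ware_filter_alt filter
instance (filter : List String) (out : List (String × List (String × List String))) : Decidable (Spec_ware_filter filter out) := by unfold Spec_ware_filter; infer_instance

-- ===== CLAIM (what is proved, stated in full; the proofs are below) =====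
def Claim_equal_ware_filter : Prop := ∀ (filter : List String), Dom_ware_filter filter → Spec_ware_filter filter (ware_filter filter)

-- ===== LEMMAS AND PROOFS =====


def pvStep (d : PySem.Dict String (List String)) (p : String × String) : PySem.Dict String (List String) :=
  PySem.Dict.modify (if d.contains p.1 then d else d.insert p.1 []) p.1 [] (fun v => v ++ [p.2])

def pvGroup (ps : List (String × String)) : List (String × List String) :=
  (PySem.List.dedup (ps.map Prod.fst)).map
    (fun c => (c, (ps.filter (fun q => q.1 == c)).map Prod.snd))

lemma pvDedup_concat (xs : List String) (x : String) :
    PySem.List.dedup (xs ++ [x]) =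
      if x ∈ xs then PySem.List.dedup xs else PySem.List.dedup xs ++ [x] := by
  have hmem : (PySem.List.dedup xs).contains x = true ↔ x ∈ xs := by
    rw [List.contains_iff_mem]
    exact PySem.Set.mem_ofList xs x
  by_cases hx : x ∈ xs <;>
    simp only [PySem.List.dedup, PySem.Set.ofList, List.foldl_append, List.foldl,
      PySem.Set.add, hx, if_true, if_false] <;>
    [rw [if_pos]; rw [if_neg]]
  · exact hmem.2 hx
  · intro hc; exact hx (hmem.1 hc)

lemma pvFind_pair (g : String → List String) (l : List String) (x : String) (hx : x ∈ l) :
    List.find? (fun q => q.1 == x) (l.map (fun c => (c, g c))) = some (x, g x) := by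
  induction l with
  | nil => cases hx
  | cons a l ih =>
    rcases List.mem_cons.1 hx with rfl | h
    · simp
    · by_cases ha : a = x
      · subst ha; simp
      · simp only [List.map_cons, List.find?_cons, show (a == x) = false by simp [ha]]
        exact ih h

lemma pvGroup_invariant (ps : List (String × String)) :
    (ps.foldl pvStep ⟨[]⟩).items = pvGroup ps := by
  induction ps using List.reverseRecOn with
  | nil => rfl
  | append_singleton ps p ih =>
    rw [List.foldl_append]
    simp only [List.foldl]
    have hfst : (ps ++ [p]).map Prod.fst = ps.map Prod.fst ++ [p.1] := by simp
    have hcont : ((ps.foldl pvStep ⟨[]⟩).contains p.1 = true) ↔ p.1 ∈ ps.map Prod.fst := by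
      rw [PySem.Dict.contains, ih]
      unfold pvGroup
      rw [List.any_map]
      constructor
      · intro h
        rcases List.any_eq_true.1 h with ⟨c, hc, hbeq⟩
        have : c = p.1 := by simpa using hbeq
        subst this
        exact (PySem.Set.mem_ofList _ _).1 hc
      · intro h
        refine List.any_eq_true.2 ⟨p.1, (PySem.Set.mem_ofList _ _).2 h, by simp⟩
    by_cases hx : p.1 ∈ ps.map Prod.fst
    · -- existing category: the dict entry is updated in place
      have hc : (ps.foldl pvStep ⟨[]⟩).contains p.1 = true := hcont.2 hx
      simp only [pvStep]
      rw [if_pos hc]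
      have hgetD : (ps.foldl pvStep ⟨[]⟩).getD p.1 [] =
          (ps.filter (fun q => q.1 == p.1)).map Prod.snd := by
        rw [PySem.Dict.getD, PySem.Dict.get?, ih]
        unfold pvGroup
        rw [pvFind_pair _ (PySem.List.dedup (ps.map Prod.fst)) p.1 (show p.1 ∈ PySem.List.dedup (ps.map Prod.fst) from (PySem.Set.mem_ofList _ _).2 hx)]
        rfl
      rw [PySem.Dict.modify, hgetD, PySem.Dict.insert, if_pos hc, ih]
      unfold pvGroup
      rw [hfst, pvDedup_concat, if_pos hx, List.map_map]
      apply List.map_congr_left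
      intro c _
      by_cases hcp : c = p.1
      · subst hcp
        simp [List.filter_append]
      · simp [Function.comp, List.filter_append,
          show (c == p.1) = false by simp [hcp],
          show (p.1 == c) = false by simp [Ne.symm hcp]]
    · -- new category: a fresh entry is appended at the end
      have hc : (ps.foldl pvStep ⟨[]⟩).contains p.1 = false := by
        cases h : (ps.foldl pvStep ⟨[]⟩).contains p.1
        · rfl
        · exact absurd (hcont.1 h) hx
      simp only [pvStep]
      rw [if_neg (by simp [hc])]
      have hkeys : ∀ q ∈ (ps.foldl pvStep ⟨[]⟩).items, (q.1 == p.1) = false := by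
        intro q hq
        rw [ih] at hq
        unfold pvGroup at hq
        rcases List.mem_map.1 hq with ⟨c, hcmem, rfl⟩
        have hcm : c ∈ ps.map Prod.fst := (PySem.Set.mem_ofList _ _).1 hcmem
        simp only [beq_eq_false_iff_ne, ne_eq]
        rintro rfl
        exact hx hcm
      have hins : (PySem.Dict.insert (ps.foldl pvStep ⟨[]⟩) p.1 []).items =
          (ps.foldl pvStep ⟨[]⟩).items ++ [(p.1, [])] := by
        rw [PySem.Dict.insert, if_neg (by simp [hc])]
      have hcont2 : (PySem.Dict.insert (ps.foldl pvStep ⟨[]⟩) p.1 ([]:List String)).contains p.1 = true := by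
        rw [PySem.Dict.contains, hins]
        simp
      have hgetD : (PySem.Dict.insert (ps.foldl pvStep ⟨[]⟩) p.1 ([]:List String)).getD p.1 [] = [] := by
        rw [PySem.Dict.getD, PySem.Dict.get?, hins, List.find?_append]
        rw [List.find?_eq_none.2 (by intro q hq; simp [hkeys q hq])]
        simp
      rw [PySem.Dict.modify, hgetD, PySem.Dict.insert, if_pos hcont2, hins]
      show (((ps.foldl pvStep ⟨[]⟩).items ++ [(p.1, ([]:List String))]).map
          (fun q => if q.1 == p.1 then (p.1, [] ++ [p.2]) else q)) = pvGroup (ps ++ [p])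
      rw [List.map_append,
        List.map_congr_left (fun q hq => if_neg (by simp [hkeys q hq])),
        List.map_id', ih]
      unfold pvGroup
      rw [hfst, pvDedup_concat, if_neg hx, List.map_append]
      congr 1
      · apply List.map_congr_left
        intro c hcmem
        have hcp : c ≠ p.1 := fun h => hx (h ▸ (PySem.Set.mem_ofList _ _).1 hcmem)
        simp [List.filter_append, show (p.1 == c) = false by simp [Ne.symm hcp]]
      · have hnil : ps.filter (fun q => q.1 == p.1) = [] :=
          List.filter_eq_nil_iff.2 (fun q hq => by
            simp only [Bool.not_eq_true, beq_eq_false_iff_ne, ne_eq]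
            intro hqe
            exact hx (hqe ▸ List.mem_map_of_mem hq))
        simp [List.filter_append, hnil]


-- ===== VERDICT (by name: the statement is the Claim_ definition above) =====
theorem ware_filter_spec : Claim_equal_ware_filter := by
  intro filter _
  show ware_filter filter = ware_filter_alt filter
  have hfold : ∀ (l : List String) (d : PySem.Dict String (List String)),
      l.foldl (fun categ i =>
        let cat := PySem.Str.slice i none (some 32)
        let attr := PySem.Str.slice i (some 33) none
        let categ := if categ.contains cat then categ else categ.insert cat []
        categ.modify cat [] (fun v => v ++ [attr])) d =
      (l.map (fun i => (PySem.Str.slice i none (some 32), PySem.Str.slice i (some 33) none))).foldl pvStep d := by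
    intro l d
    rw [List.foldl_map]
    rfl
  unfold ware_filter ware_filter_alt
  rw [hfold]
  show ((List.map (fun i => (PySem.Str.slice i none (some 32), PySem.Str.slice i (some 33) none)) filter).foldl pvStep ⟨[]⟩).items.map (fun iv => ("attr." ++ iv.1, [("$in", iv.2)])) =
    (PySem.List.dedup ((List.map (fun i => (PySem.Str.slice i none (some 32), PySem.Str.slice i (some 33) none)) filter).map Prod.fst)).map
      (fun c => ("attr." ++ c, [("$in", ((List.map (fun i => (PySem.Str.slice i none (some 32), PySem.Str.slice i (some 33) none)) filter).filter (fun p => p.1 == c)).map Prod.snd)]))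
  rw [pvGroup_invariant]
  unfold pvGroup
  rw [List.map_map]
  rfl
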